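-- pv_equiv track=rewrite | github.com/godot-escoria/escoria-demo-game | tools/docstring_formatter.py | extract_note_lines
-- ===== SOURCE A (Python) =====
-- from typing import Dict, Iterable, List, Optional, Sequence, Tuple
--
-- BR_TOKEN = "[br]"
--
-- def strip_br_suffix(text: str) -> Tuple[str, bool]:
--     """
--     Remove a trailing `[br]` token from the given string.
--     Returns a tuple of (new_text, removed_br).
--     """
--     updated = text.rstrip()
--     if updated.endswith(BR_TOKEN):
--         updated = updated[: -len(BR_TOKEN)].rstrip()
--         return updated, True
--     return text, False
--
-- WARNING_PREFIXES = ("**Warning**", "**Note**", "**Notes**", "**Warning:**", "**Note:**")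
--
-- def extract_note_lines(lines: Sequence[str]) -> Tuple[List[str], List[str]]:
--     notes: List[str] = []
--     filtered: List[str] = []
--     note_active = False
--     for line in lines:
--         stripped = line.strip()
--         if not stripped:
--             filtered.append(line)
--             note_active = False
--             continue
--         text, _ = strip_br_suffix(stripped)
--         text = text.strip()
--         if not text:
--             filtered.append(line)
--             note_active = False
--             continue
--         if note_active:
--             notes[-1] += f" {text}"
--             continue
--         if any(text.startswith(prefix) for prefix in WARNING_PREFIXES):
--             notes.append(text)
--             note_active = True
--             continue
--         if text.startswith("@"):
--             notes.append(text)
--             note_active = False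
--             continue
--         filtered.append(line)
--     return notes, filtered
-- ===== SOURCE B (Python) =====
-- from typing import List, Optional, Sequence, Tuple
--
-- BR_TOKEN = "[br]"
-- WARNING_PREFIXES = ("**Warning**", "**Note**", "**Notes**", "**Warning:**", "**Note:**")
--
--
-- def _processed(line: str) -> Optional[str]:
--     """Strip, drop a trailing [br], strip again; None if nothing is left."""
--     stripped = line.strip()
--     if not stripped:
--         return None
--     updated = stripped.rstrip()
--     if updated.endswith(BR_TOKEN):
--         stripped = updated[: -len(BR_TOKEN)].rstrip()
--     text = stripped.strip()
--     return text if text else None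
--
--
-- def extract_note_lines(lines: Sequence[str]) -> Tuple[List[str], List[str]]:
--     notes: List[str] = []
--     filtered: List[str] = []
--     i, n = 0, len(lines)
--     while i < n:
--         line = lines[i]
--         text = _processed(line)
--         i += 1
--         if text is None:
--             filtered.append(line)
--         elif any(text.startswith(p) for p in WARNING_PREFIXES):
--             note = text
--             while i < n:
--                 cont = _processed(lines[i])
--                 i += 1
--                 if cont is None:
--                     filtered.append(lines[i - 1])
--                     break
--                 note += " " + cont
--             notes.append(note)
--         elif text.startswith("@"):
--             notes.append(text)
--         else:
--             filtered.append(line)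
--     return notes, filtered
-- ===== Notes on version B (the rewrite author's own statement) =====
-- stated objective: alternative
-- what changed: Replaces A's single fold with a boolean note_active state flag by an index-based outer loop that, on meeting a warning prefix, runs an inner loop consuming the whole continuation block into one note string before moving on; line processing is factored into one helper returning None for blank/emptied lines.
import Mathlib
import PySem

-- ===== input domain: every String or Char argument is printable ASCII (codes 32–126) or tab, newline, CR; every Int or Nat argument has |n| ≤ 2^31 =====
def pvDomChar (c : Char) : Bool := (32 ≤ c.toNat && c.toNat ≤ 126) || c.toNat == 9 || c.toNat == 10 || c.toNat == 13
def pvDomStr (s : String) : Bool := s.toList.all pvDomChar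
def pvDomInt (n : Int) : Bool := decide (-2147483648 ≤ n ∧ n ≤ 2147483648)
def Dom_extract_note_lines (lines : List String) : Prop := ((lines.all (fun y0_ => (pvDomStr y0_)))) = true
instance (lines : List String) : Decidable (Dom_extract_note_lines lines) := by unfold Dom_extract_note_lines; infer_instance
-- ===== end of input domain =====

-- B replaces A's fold-with-note_active-flag by an index-style outer loop with an inner
-- continuation-consuming loop (a different decomposition, same cost); return values proved equal.

-- ===== PORT A =====
def BR_TOKEN : String := "[br]"

def strip_br_suffix (text : String) : String × Bool :=
  let updated := PySem.Str.rstrip text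
  if PySem.Str.endswith updated BR_TOKEN then
    (PySem.Str.rstrip (PySem.Str.slice updated none (some (-4))), true)
  else (text, false)

def WARNING_PREFIXES : List String :=
  ["**Warning**", "**Note**", "**Notes**", "**Warning:**", "**Note:**"]

-- Python's `notes[-1] += s` on a nonempty list (note_active is only true after an append,
-- so the list is never empty when this is reached).
def appendLast : List String → String → List String
  | [], _ => []
  | [x], s => [x ++ s]
  | x :: y :: rest, s => x :: appendLast (y :: rest) s

def aStep (st : List String × List String × Bool) (line : String) :
    List String × List String × Bool :=
  let stripped := PySem.Str.strip line
  if stripped = "" then (st.1, st.2.1 ++ [line], false)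
  else
    let text := (strip_br_suffix stripped).1
    let text := PySem.Str.strip text
    if text = "" then (st.1, st.2.1 ++ [line], false)
    else if st.2.2 then (appendLast st.1 (" " ++ text), st.2.1, st.2.2)
    else if WARNING_PREFIXES.any (fun p => PySem.Str.startswith text p) then
      (st.1 ++ [text], st.2.1, true)
    else if PySem.Str.startswith text "@" then (st.1 ++ [text], st.2.1, false)
    else (st.1, st.2.1 ++ [line], false)

def extract_note_lines (lines : List String) : List String × List String :=
  let st := lines.foldl aStep (([] : List String), ([] : List String), false)
  (st.1, st.2.1)

-- ===== PORT B =====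
-- _processed from Source B: strip, drop trailing [br], strip again; none if nothing is left.
def procLine (line : String) : Option String :=
  let stripped := PySem.Str.strip line
  if stripped = "" then none
  else
    let updated := PySem.Str.rstrip stripped
    let stripped2 :=
      if PySem.Str.endswith updated BR_TOKEN then
        PySem.Str.rstrip (PySem.Str.slice updated none (some (-4)))
      else stripped
    let text := PySem.Str.strip stripped2
    if text = "" then none else some text

def isWarning (text : String) : Bool :=
  WARNING_PREFIXES.any (fun p => PySem.Str.startswith text p)

-- the inner while loop: consume continuation lines onto `note`; returns the grown note,
-- the stopping blank line (forwarded to filtered) if any, and the remaining lines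
def bCont (note : String) : List String → String × List String × List String
  | [] => (note, [], [])
  | l :: rest =>
    match procLine l with
    | none => (note, [l], rest)
    | some t => bCont (note ++ (" " ++ t)) rest

theorem bCont_len (note : String) (lines : List String) :
    (bCont note lines).2.2.length ≤ lines.length := by
  induction lines generalizing note with
  | nil => simp [bCont]
  | cons l rest ih =>
    cases h : procLine l with
    | none => simp [bCont, h]
    | some t =>
      simp only [bCont, h]
      exact le_trans (ih _) (Nat.le_succ _)

-- the outer while loop over the remaining lines
def bLoop : List String → List String × List String
  | [] => ([], [])
  | l :: rest =>
    match procLine l with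
    | none => let r := bLoop rest; (r.1, l :: r.2)
    | some t =>
      if isWarning t then
        let c := bCont t rest
        let r := bLoop c.2.2
        (c.1 :: r.1, c.2.1 ++ r.2)
      else if PySem.Str.startswith t "@" then
        let r := bLoop rest; (t :: r.1, r.2)
      else
        let r := bLoop rest; (r.1, l :: r.2)
termination_by lines => lines.length
decreasing_by
  all_goals simp
  all_goals exact bCont_len _ _

def extract_note_lines_alt (lines : List String) : List String × List String :=
  bLoop lines

-- ===== PRECONDITION & SPEC =====
def Spec_extract_note_lines (lines : List String) (out : List String × List String) : Prop := out = extract_note_lines_alt lines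
instance (lines : List String) (out : List String × List String) : Decidable (Spec_extract_note_lines lines out) := by unfold Spec_extract_note_lines; infer_instance

-- ===== CLAIM (what is proved, stated in full; the proofs are below) =====
def Claim_equal_extract_note_lines : Prop := ∀ (lines : List String), Dom_extract_note_lines lines → Spec_extract_note_lines lines (extract_note_lines lines)

-- ===== LEMMAS AND PROOFS =====

theorem appendLast_append : ∀ (ns : List String) (x s : String),
    appendLast (ns ++ [x]) s = ns ++ [x ++ s]
  | [], x, s => by simp [appendLast]
  | [a], x, s => by simp [appendLast]
  | a :: b :: l, x, s => by
    simpa [appendLast] using appendLast_append (b :: l) x s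

theorem aStep_eq (st : List String × List String × Bool) (l : String) :
    aStep st l =
      match procLine l with
      | none => (st.1, st.2.1 ++ [l], false)
      | some t =>
        if st.2.2 then (appendLast st.1 (" " ++ t), st.2.1, st.2.2)
        else if isWarning t then (st.1 ++ [t], st.2.1, true)
        else if PySem.Str.startswith t "@" then (st.1 ++ [t], st.2.1, false)
        else (st.1, st.2.1 ++ [l], false) := by
  unfold aStep procLine strip_br_suffix isWarning
  simp only [apply_ite Prod.fst]
  split_ifs <;> simp_all

theorem main_both : ∀ (n : Nat) (lines : List String), lines.length ≤ n →
    (∀ ns fs : List String,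
      ((List.foldl aStep (ns, fs, false) lines).1, (List.foldl aStep (ns, fs, false) lines).2.1)
        = (ns ++ (bLoop lines).1, fs ++ (bLoop lines).2))
    ∧ (∀ (ns fs : List String) (note : String),
      ((List.foldl aStep (ns ++ [note], fs, true) lines).1,
        (List.foldl aStep (ns ++ [note], fs, true) lines).2.1)
        = (ns ++ (bCont note lines).1 :: (bLoop (bCont note lines).2.2).1,
           fs ++ (bCont note lines).2.1 ++ (bLoop (bCont note lines).2.2).2)) := by
  intro n
  induction n with
  | zero =>
    intro lines h
    have : lines = [] := List.eq_nil_of_length_eq_zero (Nat.le_zero.mp h)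
    subst this
    constructor
    · intro ns fs; simp [bLoop]
    · intro ns fs note; simp [bCont, bLoop]
  | succ n ih =>
    intro lines h
    cases lines with
    | nil =>
      constructor
      · intro ns fs; simp [bLoop]
      · intro ns fs note; simp [bCont, bLoop]
    | cons l rest =>
      have hr : rest.length ≤ n := by simpa using Nat.succ_le_succ_iff.mp h
      constructor
      · intro ns fs
        rw [List.foldl_cons, aStep_eq]
        cases hp : procLine l with
        | none =>
          simp only [bLoop, hp]
          simpa using ((ih rest hr).1 ns (fs ++ [l]))
        | some t =>
          by_cases hw : isWarning t = true
          · have hc : (bCont t rest).2.2.length ≤ n :=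
              le_trans (bCont_len _ _) hr
            simp only [bLoop, hp, hw, if_true]
            have := (ih rest hr).2 ns fs t
            simpa using this
          · by_cases ha : PySem.Str.startswith t "@" = true
            · simp only [bLoop, hp, hw, ha, if_true]
              simpa using ((ih rest hr).1 (ns ++ [t]) fs)
            · simp only [bLoop, hp, hw, ha]
              simpa using ((ih rest hr).1 ns (fs ++ [l]))
      · intro ns fs note
        rw [List.foldl_cons, aStep_eq]
        cases hp : procLine l with
        | none =>
          simp only [bCont, hp]
          simpa using ((ih rest hr).1 (ns ++ [note]) (fs ++ [l]))
        | some t =>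
          simp only [bCont, hp]
          rw [appendLast_append]
          simpa using ((ih rest hr).2 ns fs (note ++ (" " ++ t)))

-- ===== VERDICT (by name: the statement is the Claim_ definition above) =====
theorem extract_note_lines_spec : Claim_equal_extract_note_lines := by
  unfold Claim_equal_extract_note_lines
  intro lines _
  unfold Spec_extract_note_lines extract_note_lines extract_note_lines_alt
  have := (main_both lines.length lines le_rfl).1 [] []
  simp only [List.nil_append] at this
  simp only []
  exact Prod.ext (congrArg Prod.fst this) (congrArg Prod.snd this)
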